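-- pv_equiv track=rewrite | github.com/waldemarhahn/FARM | farm/metrics.py | _correct_bio_encodings
-- ===== SOURCE A (Python) =====
-- def _correct_bio_encodings(predictions):
--     for sent_index in range(len(predictions)):
--         label_started = False
--         label_class = None
--
--         for label_index in range(len(predictions[sent_index])):
--             label = predictions[sent_index][label_index]
--             if label.startswith("B-"):
--                 label_started = True
--                 label_class = label[2:]
--
--             elif label == "O":
--                 label_started = False
--                 label_class = None
--             elif label.startswith("I-"):
--                 if not label_started or label[2:] != label_class:
--                     predictions[sent_index][label_index] = "O"
--                     label_started = False
--                     label_class = None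
--             else:
--                 assert False  # Should never be reached
--     return predictions
-- ===== SOURCE B (Python) =====
-- def _correct_bio_encodings(predictions):
--     # Segment-based rewrite: instead of a per-token (label_started, label_class)
--     # state machine, scan each sentence by entity runs: a "B-X" anchor and its
--     # maximal run of following "I-X" tokens are copied wholesale via a slice;
--     # every other token becomes "O" if it is an I- tag (it continues nothing),
--     # else is kept.  Builds fresh lists (return value only; A mutates in place).
--     out = []
--     for sent in predictions:
--         fixed = []
--         i = 0
--         n = len(sent)
--         while i < n:
--             head = sent[i]
--             if head.startswith("B-"):
--                 cont = "I-" + head[2:]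
--                 j = i + 1
--                 while j < n and sent[j] == cont:
--                     j += 1
--                 fixed.extend(sent[i:j])   # whole entity run at once
--                 i = j
--             elif head == "O" or head.startswith("I-"):
--                 fixed.append("O")   # "O" stays "O"; a bare I- tag is corrected
--                 i += 1
--             else:
--                 assert False  # invalid label (excluded by Pre_)
--         out.append(fixed)
--     return out
-- ===== Notes on version B (the rewrite author's own statement) =====
-- stated objective: alternative
-- what changed: Replaces A's per-token (label_started, label_class) state machine with a segment-based scan: each B-X anchor and its maximal run of following I-X tokens are detected with an inner run loop and copied wholesale via a slice, and any I- tag outside such a run becomes 'O'; B builds fresh lists (return value only, A mutates in place) and, like A, asserts on labels outside the B-/I-/O alphabet (excluded by Pre_).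
import Mathlib
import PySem

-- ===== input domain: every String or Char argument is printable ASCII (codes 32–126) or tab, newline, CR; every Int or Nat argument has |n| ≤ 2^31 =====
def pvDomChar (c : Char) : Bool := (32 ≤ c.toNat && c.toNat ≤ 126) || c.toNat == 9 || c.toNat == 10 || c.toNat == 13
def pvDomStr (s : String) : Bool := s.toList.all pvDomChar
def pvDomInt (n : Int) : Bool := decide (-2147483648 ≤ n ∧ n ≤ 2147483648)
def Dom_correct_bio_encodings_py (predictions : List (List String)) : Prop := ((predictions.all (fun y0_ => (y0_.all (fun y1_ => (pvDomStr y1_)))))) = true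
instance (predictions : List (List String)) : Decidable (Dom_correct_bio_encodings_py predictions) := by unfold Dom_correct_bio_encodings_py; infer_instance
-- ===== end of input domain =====

-- B replaces A's per-token (label_started, label_class) state machine with a segment-based
-- scan: a B-X anchor and its maximal run of following I-X tokens are copied wholesale via a
-- slice, stray I- tags become "O".  Return value only: A mutates its argument in place, B
-- builds fresh lists.

-- ===== PORT A =====
-- inner loop of A over one sentence, carrying (label_started, label_class);
-- the `assert False` branch (unreachable under Pre_) keeps the label and state unchanged.
def fixSentA : List String → Bool → Option String → List String
  | [], _, _ => []
  | l :: rest, started, cls =>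
    if PySem.Str.startswith l "B-" then
      l :: fixSentA rest true (some (PySem.Str.slice l (some 2) none))
    else if l = "O" then
      l :: fixSentA rest false none
    else if PySem.Str.startswith l "I-" then
      if !started || some (PySem.Str.slice l (some 2) none) ≠ cls then
        "O" :: fixSentA rest false none
      else
        l :: fixSentA rest started cls
    else
      l :: fixSentA rest started cls  -- Python: assert False (raises); outside Pre_

def correct_bio_encodings_py (predictions : List (List String)) : List (List String) :=
  predictions.map (fun sent => fixSentA sent false none)

-- ===== PORT B =====
-- inner `while j < n and sent[j] == cont: j += 1` of B: the final value of j
def runEnd (sent : List String) (cont : String) (j : Nat) : Nat :=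
  if h : j < sent.length then
    if sent[j] = cont then runEnd sent cont (j + 1) else j
  else j
termination_by sent.length - j

-- termination helper for fixLoop (cited in its decreasing_by)
lemma runEnd_ge (sent : List String) (cont : String) (j : Nat) : j ≤ runEnd sent cont j := by
  fun_induction runEnd sent cont j <;> omega

-- outer `while i < n` loop of B over one sentence, carrying the output list `fixed`
def fixLoop (sent : List String) (i : Nat) (fixed : List String) : List String :=
  if h : i < sent.length then
    if PySem.Str.startswith sent[i] "B-" then
      fixLoop sent (runEnd sent ("I-" ++ PySem.Str.slice sent[i] (some 2) none) (i + 1))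
        (fixed ++ PySem.List.slice sent (some (i : Int))
          (some ((runEnd sent ("I-" ++ PySem.Str.slice sent[i] (some 2) none) (i + 1) : Nat) : Int)))
    else if sent[i] = "O" || PySem.Str.startswith sent[i] "I-" then
      fixLoop sent (i + 1) (fixed ++ ["O"])
    else
      fixLoop sent (i + 1) (fixed ++ [sent[i]])  -- Python: assert False (raises); outside Pre_
  else fixed
termination_by sent.length - i
decreasing_by
  · have := runEnd_ge sent ("I-" ++ PySem.Str.slice sent[i] (some 2) none) (i + 1); omega
  · omega
  · omega

def correct_bio_encodings_py_alt (predictions : List (List String)) : List (List String) :=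
  predictions.map (fun sent => fixLoop sent 0 [])

-- ===== PRECONDITION & SPEC =====
def pvValidLabel (l : String) : Bool :=
  PySem.Str.startswith l "B-" || l == "O" || PySem.Str.startswith l "I-"

-- Pre_ excludes exactly the inputs on which A's `assert False` raises AssertionError:
-- some label is not "O" and starts with neither "B-" nor "I-".
def Pre_correct_bio_encodings_py (predictions : List (List String)) : Prop :=
  (predictions.all (fun sent => sent.all pvValidLabel)) = true
instance (predictions : List (List String)) : Decidable (Pre_correct_bio_encodings_py predictions) := by
  unfold Pre_correct_bio_encodings_py; infer_instance

def pvWitness_correct_bio_encodings_py : List (List String) :=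
  [["B-PER", "I-PER", "O", "I-LOC"], ["I-PER"]]

def Spec_correct_bio_encodings_py (predictions : List (List String)) (out : List (List String)) : Prop :=
  out = correct_bio_encodings_py_alt predictions
instance (predictions : List (List String)) (out : List (List String)) : Decidable (Spec_correct_bio_encodings_py predictions out) := by
  unfold Spec_correct_bio_encodings_py; infer_instance

-- ===== CLAIM =====
def Claim_equal_correct_bio_encodings_py : Prop := ∀ (predictions : List (List String)), Dom_correct_bio_encodings_py predictions → Pre_correct_bio_encodings_py predictions → Spec_correct_bio_encodings_py predictions (correct_bio_encodings_py predictions)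

-- ===== LEMMAS AND PROOFS =====

-- recursive, list-level reformulation of B's index loop (proof-side only)
def fixRec : List String → List String
  | [] => []
  | head :: rest =>
    if PySem.Str.startswith head "B-" then
      head :: ((rest.takeWhile (fun x => x == "I-" ++ PySem.Str.slice head (some 2) none)) ++
        fixRec (rest.drop (rest.takeWhile (fun x => x == "I-" ++ PySem.Str.slice head (some 2) none)).length))
    else if head = "O" || PySem.Str.startswith head "I-" then
      "O" :: fixRec rest
    else head :: fixRec rest
termination_by xs => xs.length
decreasing_by
  · simp
  · simp
  · simp

lemma fixRec_nil : fixRec [] = [] := by simp [fixRec]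

lemma fixRec_cons (head : String) (rest : List String) :
    fixRec (head :: rest) =
      if PySem.Str.startswith head "B-" then
        head :: ((rest.takeWhile (fun x => x == "I-" ++ PySem.Str.slice head (some 2) none)) ++
          fixRec (rest.drop (rest.takeWhile (fun x => x == "I-" ++ PySem.Str.slice head (some 2) none)).length))
      else if head = "O" || PySem.Str.startswith head "I-" then
        "O" :: fixRec rest
      else head :: fixRec rest := by
  rw [fixRec]

lemma drop_length_takeWhile {α : Type} (p : α → Bool) (l : List α) :
    l.drop (l.takeWhile p).length = l.dropWhile p := by
  induction l with
  | nil => rfl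
  | cons a l ih => by_cases h : p a <;> simp [h, ih]

-- string facts about the continuation label "I-" ++ c
lemma cont_toList (c : String) : ("I-" ++ c).toList = 'I' :: '-' :: c.toList := by
  rw [String.toList_append, show "I-".toList = ['I', '-'] from by decide]
  rfl

lemma cont_not_B (c : String) : PySem.Str.startswith ("I-" ++ c) "B-" = false := by
  rw [PySem.Str.startswith_eq, Bool.eq_false_iff]
  intro h
  rw [PySem.Chars.startswith_iff] at h
  obtain ⟨t, ht⟩ := h
  rw [cont_toList, show "B-".toList = ['B', '-'] from by decide] at ht
  simp at ht

lemma cont_ne_O (c : String) : ("I-" ++ c) ≠ "O" := by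
  intro h
  have h2 := congrArg String.toList h
  rw [cont_toList, show "O".toList = ['O'] from by decide] at h2
  simp at h2

lemma cont_is_I (c : String) : PySem.Str.startswith ("I-" ++ c) "I-" = true := by
  rw [PySem.Str.startswith_eq, PySem.Chars.startswith_iff]
  exact ⟨c.toList, by simp [show "I-".toList = ['I', '-'] from by decide]⟩

lemma cont_class (c : String) : PySem.Str.slice ("I-" ++ c) (some 2) none = c := by
  apply String.ext
  rw [PySem.Str.toList_slice, PySem.Chars.slice_eq_listSlice, cont_toList,
    show (2 : Int) = ((2 : Nat) : Int) by norm_num, PySem.List.slice_from_natCast]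
  rfl

-- an I- label with class c IS "I-" ++ c
lemma eq_cont_of_I {x c : String} (hI : PySem.Str.startswith x "I-" = true)
    (hc : PySem.Str.slice x (some 2) none = c) : x = "I-" ++ c := by
  apply String.ext
  rw [PySem.Str.startswith_eq, PySem.Chars.startswith_iff] at hI
  obtain ⟨t, ht⟩ := hI
  have hx : x.toList = 'I' :: '-' :: t := by
    rw [← ht, show "I-".toList = ['I', '-'] from by decide]
    rfl
  have hct : c.toList = t := by
    rw [← hc, PySem.Str.toList_slice, PySem.Chars.slice_eq_listSlice,
      show (2 : Int) = ((2 : Nat) : Int) by norm_num, PySem.List.slice_from_natCast, hx]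
    rfl
  rw [cont_toList, hx, hct]

-- after a broken chain, A's (true, some c) state behaves like the reset state
lemma fixSentA_reset {x : String} (hv : pvValidLabel x = true) (c : String)
    (hne : x ≠ "I-" ++ c) (t : List String) :
    fixSentA (x :: t) true (some c) = fixSentA (x :: t) false none := by
  simp only [fixSentA]
  by_cases hB : PySem.Str.startswith x "B-" = true
  · simp only [if_pos hB]
  · simp only [if_neg hB]
    by_cases hO : x = "O"
    · simp only [if_pos hO]
    · simp only [if_neg hO]
      have hI : PySem.Str.startswith x "I-" = true := by
        simp only [pvValidLabel, Bool.or_eq_true, beq_iff_eq] at hv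
        rcases hv with (h | h) | h
        · exact absurd h hB
        · exact absurd h hO
        · exact h
      have hc : PySem.Str.slice x (some 2) none ≠ c := fun h => hne (eq_cont_of_I hI h)
      have hcond1 : (!true || decide (some (PySem.Str.slice x (some 2) none) ≠ some c)) = true := by
        simp [hc]
      have hcond2 :
          (!false || decide (some (PySem.Str.slice x (some 2) none) ≠ (none : Option String))) = true := by
        simp
      simp only [if_pos hI, if_pos hcond1, if_pos hcond2]

-- A copies a whole run of continuation labels verbatim
lemma fixSentA_run (c : String) (run tail : List String)
    (hrun : ∀ x ∈ run, x = "I-" ++ c) :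
    fixSentA (run ++ tail) true (some c) = run ++ fixSentA tail true (some c) := by
  induction run with
  | nil => simp only [List.nil_append]
  | cons x run' ih =>
    have hx : x = "I-" ++ c := hrun x List.mem_cons_self
    subst hx
    have ih' := ih (fun y hy => hrun y (List.mem_cons_of_mem _ hy))
    have hBn : ¬ PySem.Str.startswith ("I-" ++ c) "B-" = true := by
      rw [cont_not_B]; decide
    have hcond : ¬ ((!true ||
        decide (some (PySem.Str.slice ("I-" ++ c) (some 2) none) ≠ some c)) = true) := by
      simp [cont_class]
    simp only [List.cons_append, fixSentA, if_neg hBn, if_neg (cont_ne_O c),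
      if_pos (cont_is_I c), if_neg hcond]
    exact congrArg _ ih'

-- runEnd computes the takeWhile length
lemma runEnd_eq (sent : List String) (cont : String) (j : Nat) :
    runEnd sent cont j = j + ((sent.drop j).takeWhile (fun x => x == cont)).length := by
  fun_induction runEnd sent cont j with
  | case1 j h heq ih =>
    rw [ih, ← List.getElem_cons_drop h, List.takeWhile_cons]
    simp only [heq, beq_self_eq_true, if_true, List.length_cons]
    omega
  | case2 j h heq =>
    rw [← List.getElem_cons_drop h, List.takeWhile_cons]
    have : (sent[j] == cont) = false := by simpa using heq
    simp [this]
  | case3 j h =>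
    rw [List.drop_eq_nil_of_le (by omega)]
    simp

-- B's index loop is the recursive reformulation
lemma fixLoop_eq (sent : List String) (i : Nat) (fixed : List String) :
    fixLoop sent i fixed = fixed ++ fixRec (sent.drop i) := by
  fun_induction fixLoop sent i fixed with
  | case1 i fixed h hB ih =>
    rw [ih, ← List.getElem_cons_drop h, fixRec_cons, if_pos hB]
    have hrun : (sent.drop (i + 1)).takeWhile
        (fun x => x == "I-" ++ PySem.Str.slice sent[i] (some 2) none) =
        (sent.drop (i + 1)).take ((sent.drop (i + 1)).takeWhile
          (fun x => x == "I-" ++ PySem.Str.slice sent[i] (some 2) none)).length :=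
      List.prefix_iff_eq_take.mp (List.takeWhile_prefix _)
    have hj := runEnd_eq sent ("I-" ++ PySem.Str.slice sent[i] (some 2) none) (i + 1)
    have hslice : PySem.List.slice sent (some (i : Int))
        (some ((runEnd sent ("I-" ++ PySem.Str.slice sent[i] (some 2) none) (i + 1) : Nat) : Int)) =
        sent[i] :: (sent.drop (i + 1)).takeWhile
          (fun x => x == "I-" ++ PySem.Str.slice sent[i] (some 2) none) := by
      rw [PySem.List.slice_natCast, ← List.getElem_cons_drop h, hj]
      have h1 : i + 1 + ((sent.drop (i + 1)).takeWhile
          (fun x => x == "I-" ++ PySem.Str.slice sent[i] (some 2) none)).length - i =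
          ((sent.drop (i + 1)).takeWhile
            (fun x => x == "I-" ++ PySem.Str.slice sent[i] (some 2) none)).length + 1 := by
        omega
      rw [h1, List.take_succ_cons, ← hrun]
    have hdrop : sent.drop (runEnd sent ("I-" ++ PySem.Str.slice sent[i] (some 2) none) (i + 1)) =
        (sent.drop (i + 1)).drop ((sent.drop (i + 1)).takeWhile
          (fun x => x == "I-" ++ PySem.Str.slice sent[i] (some 2) none)).length := by
      rw [List.drop_drop, hj]
    rw [hslice, hdrop]
    simp
  | case2 i fixed h hB hOI ih =>
    rw [ih, ← List.getElem_cons_drop h, fixRec_cons, if_neg (by simpa using hB), if_pos hOI]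
    simp
  | case3 i fixed h hB hOI ih =>
    rw [ih, ← List.getElem_cons_drop h, fixRec_cons, if_neg (by simpa using hB),
      if_neg (by simpa using hOI)]
    simp
  | case4 i fixed h =>
    rw [List.drop_eq_nil_of_le (by omega), fixRec_nil, List.append_nil]

-- the recursive reformulation equals A's state machine on valid sentences
lemma fixRec_eq (sent : List String) (hsent : ∀ x ∈ sent, pvValidLabel x = true) :
    fixRec sent = fixSentA sent false none := by
  induction hlen : sent.length using Nat.strong_induction_on generalizing sent with
  | _ n ih =>
    cases sent with
    | nil => simp [fixRec_nil, fixSentA]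
    | cons head rest =>
      have hrest : ∀ x ∈ rest, pvValidLabel x = true :=
        fun x hx => hsent x (List.mem_cons_of_mem _ hx)
      by_cases hB : PySem.Str.startswith head "B-" = true
      · rw [fixRec_cons, if_pos hB, drop_length_takeWhile]
        have hA : fixSentA (head :: rest) false none =
            head :: fixSentA rest true (some (PySem.Str.slice head (some 2) none)) := by
          simp only [fixSentA, if_pos hB]
        rw [hA]
        congr 1
        conv_rhs => rw [← List.takeWhile_append_dropWhile
          (p := fun x => x == "I-" ++ PySem.Str.slice head (some 2) none) (l := rest)]
        rw [fixSentA_run _ _ _ (fun x hx => by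
          have := List.mem_takeWhile_imp hx
          exact eq_of_beq this)]
        congr 1
        cases hdw : rest.dropWhile (fun x => x == "I-" ++ PySem.Str.slice head (some 2) none) with
        | nil => simp [fixRec_nil, fixSentA]
        | cons y t' =>
          have hmem : y ∈ rest := (List.dropWhile_sublist _).subset (hdw ▸ List.mem_cons_self)
          have hylen : t'.length < rest.length := by
            have := (List.dropWhile_sublist
              (p := fun x => x == "I-" ++ PySem.Str.slice head (some 2) none) (l := rest)).length_le
            rw [hdw] at this
            simp at this
            omega
          have hy : (y == "I-" ++ PySem.Str.slice head (some 2) none) = false := by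
            have hne : rest.dropWhile
                (fun x => x == "I-" ++ PySem.Str.slice head (some 2) none) ≠ [] := by
              simp [hdw]
            have := List.head_dropWhile_not
              (fun x => x == "I-" ++ PySem.Str.slice head (some 2) none) hne
            simpa [hdw] using this
          have hyne : y ≠ "I-" ++ PySem.Str.slice head (some 2) none := by
            simpa using hy
          rw [fixSentA_reset (hrest y hmem) _ hyne t']
          have hsub : ∀ x ∈ y :: t', pvValidLabel x = true := by
            intro x hx
            apply hrest
            exact (List.dropWhile_sublist _).subset (hdw ▸ hx)
          have hlt : (y :: t').length < n := by
            subst hlen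
            simp
            omega
          exact ih _ hlt _ hsub rfl
      · have ihrest : fixRec rest = fixSentA rest false none := by
          apply ih (rest.length) (by subst hlen; simp) rest hrest rfl
        by_cases hO : head = "O"
        · rw [fixRec_cons, if_neg hB, if_pos (by simp [hO]), ihrest]
          subst hO
          have hBO : ¬ PySem.Str.startswith "O" "B-" = true := by decide
          simp only [fixSentA, if_neg hBO, if_true]
        · have hI : PySem.Str.startswith head "I-" = true := by
            have hv := hsent head List.mem_cons_self
            simp only [pvValidLabel, Bool.or_eq_true, beq_iff_eq] at hv
            rcases hv with (h | h) | h
            · exact absurd h hB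
            · exact absurd h hO
            · exact h
          rw [fixRec_cons, if_neg hB, if_pos (by rw [hI]; simp), ihrest]
          have hcond : (!false ||
              decide (some (PySem.Str.slice head (some 2) none) ≠ (none : Option String))) = true := by
            simp
          simp only [fixSentA, if_neg hB, if_neg hO, if_pos hI, if_pos hcond]

-- ===== VERDICT =====
theorem correct_bio_encodings_py_spec : Claim_equal_correct_bio_encodings_py := by
  intro predictions _ hpre
  unfold Spec_correct_bio_encodings_py correct_bio_encodings_py correct_bio_encodings_py_alt
  apply List.map_congr_left
  intro sent hmem
  unfold Pre_correct_bio_encodings_py at hpre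
  rw [List.all_eq_true] at hpre
  have hv := hpre sent hmem
  rw [List.all_eq_true] at hv
  rw [fixLoop_eq, List.drop_zero, List.nil_append, fixRec_eq sent hv]
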